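-- pv_equiv track=rewrite | github.com/Itissohardtonamemyself/nowcoder | 有假币.py | find
-- ===== SOURCE A (Python) =====
-- def find(a):
--     con = 0
--     while a>1:
--         if a%3==1 or a%3==0:
--             a = a - a//3*2
--             con+=1
--         elif a%3==2:
--             a = a//3+1
--             con+=1
--     return con
-- ===== SOURCE B (Python) =====
-- def find(a):
--     p = 1
--     con = 0
--     while p < a:
--         p *= 3
--         con += 1
--     return con
-- ===== Notes on version B (the rewrite author's own statement) =====
-- stated objective: simpler
-- what changed: Instead of shrinking a to ceil(a/3) via %3 case analysis, B grows a power-of-3 threshold p from 1 and counts how many triplings are needed to reach a (least n with 3^n >= a).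
import Mathlib
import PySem

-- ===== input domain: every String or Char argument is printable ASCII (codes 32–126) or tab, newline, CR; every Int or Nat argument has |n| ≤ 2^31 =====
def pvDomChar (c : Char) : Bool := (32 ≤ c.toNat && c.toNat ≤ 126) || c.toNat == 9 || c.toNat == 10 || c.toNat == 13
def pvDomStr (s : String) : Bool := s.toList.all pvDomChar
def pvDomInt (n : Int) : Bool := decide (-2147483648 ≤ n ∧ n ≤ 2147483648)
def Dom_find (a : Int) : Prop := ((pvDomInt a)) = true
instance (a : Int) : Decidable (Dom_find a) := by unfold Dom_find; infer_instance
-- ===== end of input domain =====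

-- B replaces A's shrink-a-to-ceil(a/3) %3 case analysis by growing a power-of-3 threshold and counting triplings (simpler).


-- ===== PORT A =====
-- while a>1: if a%3 in {1,0}: a = a - a//3*2 elif a%3==2: a = a//3+1; con+=1.
-- Fuel (first argument) only makes the loop structurally recursive; fuel = a.toNat never
-- runs out because a strictly decreases each iteration (proved in findLoop_fuel_lockstep's use).
-- The trailing 'else con' branch is unreachable: a % 3 is always 0, 1 or 2 in Python.
def findLoop : Nat → Int → Int → Int
  | 0, _, con => con
  | fuel + 1, a, con =>
    if 1 < a then
      if PySem.Int.mod a 3 = 1 ∨ PySem.Int.mod a 3 = 0 then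
        findLoop fuel (a - PySem.Int.floordiv a 3 * 2) (con + 1)
      else if PySem.Int.mod a 3 = 2 then
        findLoop fuel (PySem.Int.floordiv a 3 + 1) (con + 1)
      else con
    else con

def find (a : Int) : Int := findLoop a.toNat a 0

-- ===== PORT B =====
-- p = 1; con = 0; while p < a: p *= 3; con += 1; return con.
-- Fuel = a.toNat suffices: p at least doubles past a within a - 1 steps.
def findAltLoop : Nat → Int → Int → Int → Int
  | 0, _, _, con => con
  | fuel + 1, a, p, con =>
    if p < a then findAltLoop fuel a (p * 3) (con + 1) else con

def find_alt (a : Int) : Int := findAltLoop a.toNat a 1 0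

-- ===== PRECONDITION & SPEC =====
def Spec_find (a : Int) (out : Int) : Prop := out = find_alt a
instance (a : Int) (out : Int) : Decidable (Spec_find a out) := by unfold Spec_find; infer_instance

-- ===== CLAIM (what is proved, stated in full; the proofs are below) =====
def Claim_equal_find : Prop := ∀ (a : Int), Dom_find a → Spec_find a (find a)

-- ===== LEMMAS AND PROOFS =====

-- B's loop at threshold 3*p behaves like B's loop at threshold p on the shrunk input ceil(a/3) = (a+2)//3
theorem altLoop_shift : ∀ (f : Nat) (a p con : Int), 1 ≤ p → (a - 3 * p).toNat ≤ f →
    findAltLoop f a (p * 3) con = findAltLoop f (PySem.Int.floordiv (a + 2) 3) p con := by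
  intro f
  induction f with
  | zero =>
    intro a p con hp hf
    have hc := PySem.Int.floordiv_eq_ediv_of_pos (a := a + 2) (b := 3) (by omega)
    simp only [findAltLoop]
  | succ f ih =>
    intro a p con hp hf
    have hc := PySem.Int.floordiv_eq_ediv_of_pos (a := a + 2) (b := 3) (by omega)
    simp only [findAltLoop]
    by_cases h : p * 3 < a
    · rw [if_pos h, if_pos (by omega)]
      exact ih a (p * 3) (con + 1) (by omega) (by omega)
    · rw [if_neg h, if_neg (by omega)]

-- with enough fuel the two loops agree (A's state a and B's state p move in lockstep)
theorem loop_lockstep : ∀ (f : Nat) (a con : Int), a.toNat ≤ f →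
    findLoop f a con = findAltLoop f a 1 con := by
  intro f
  induction f with
  | zero =>
    intro a con hf
    simp only [findLoop, findAltLoop]
  | succ f ih =>
    intro a con hf
    by_cases h : 1 < a
    · have h3 := PySem.Int.mod_eq_emod_of_pos (a := a) (b := 3) (by omega)
      have hfd := PySem.Int.floordiv_eq_ediv_of_pos (a := a) (b := 3) (by omega)
      have hc := PySem.Int.floordiv_eq_ediv_of_pos (a := a + 2) (b := 3) (by omega)
      simp only [findLoop, findAltLoop]
      rw [if_pos h, if_pos h]
      have hshift := altLoop_shift f a 1 (con + 1) (by norm_num) (by omega)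
      rw [hshift]
      split_ifs with h1 h2
      · rw [show a - PySem.Int.floordiv a 3 * 2 = PySem.Int.floordiv (a + 2) 3 from by omega]
        exact ih _ _ (by omega)
      · rw [show PySem.Int.floordiv a 3 + 1 = PySem.Int.floordiv (a + 2) 3 from by omega]
        exact ih _ _ (by omega)
      · omega
    · simp only [findLoop, findAltLoop]
      rw [if_neg h, if_neg h]

-- ===== VERDICT (by name: the statement is the Claim_ definition above) =====
theorem find_spec : Claim_equal_find := by
  intro a _
  unfold Spec_find find find_alt
  exact loop_lockstep a.toNat a 0 le_rfl
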